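-- pv_equiv track=rewrite | github.com/Jiyuan-Yang/paper_lookup | core/utils/condition_parser.py | chop_redundant_bracket
-- ===== SOURCE A (Python) =====
-- def chop_redundant_bracket(string: str) -> str:
--     while True:
--         check, left_or_right = has_right_level(string)
--         if check:
--             break
--         elif left_or_right == 0:
--             string = string[1:]
--         else:
--             string = string[:-1]
--     while True:
--         if len(string) > 2 and string[0] == '(' and string[-1] == ')':
--             string = string[1:-1]
--         else:
--             return string
--
-- def has_right_level(string: str) -> (bool, int or None):
--     # 0 for left, 1 for right
--     level = 0
--     for ch in string:
--         if ch == '(':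
--             level += 1
--         elif ch == ')':
--             level -= 1
--     if level == 0:
--         return True, None
--     elif level > 0:
--         return False, 0
--     else:
--         return False, 1
-- ===== SOURCE B (Python) =====
-- # B: single-pass balance trimming plus closed-form outer-pair count (no per-step rescans/slices).
--
-- def _drop_balance(bal, s):
--     # drop the shortest prefix of s whose bracket-sum equals bal; return the rest
--     for i, ch in enumerate(s):
--         bal -= (ch == '(') - (ch == ')')
--         if bal == 0:
--             return s[i + 1:]
--     return ''  # not reached when bal is the actual balance of s
--
-- def chop_redundant_bracket(string: str) -> str:
--     bal = string.count('(') - string.count(')')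
--     if bal > 0:
--         string = _drop_balance(bal, string)
--     elif bal < 0:
--         string = _drop_balance(bal, string[::-1])[::-1]
--     n = len(string)
--     p = 0
--     while p < n and string[p] == '(':
--         p += 1
--     q = 0
--     while q < n and string[n - 1 - q] == ')':
--         q += 1
--     k = min(p, q, max(0, (n - 1) // 2))
--     return string[k:n - k]
-- ===== Notes on version B (the rewrite author's own statement) =====
-- stated objective: faster
-- what changed: A rescans the whole string to recompute the bracket balance after every single-character chop and re-slices the string per stripped pair; B computes the balance once, removes the unbalanced prefix/suffix in one pass, and strips redundant outer pairs via a closed-form count from the leading '(' run, trailing ')' run and the length bound.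
import Mathlib
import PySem

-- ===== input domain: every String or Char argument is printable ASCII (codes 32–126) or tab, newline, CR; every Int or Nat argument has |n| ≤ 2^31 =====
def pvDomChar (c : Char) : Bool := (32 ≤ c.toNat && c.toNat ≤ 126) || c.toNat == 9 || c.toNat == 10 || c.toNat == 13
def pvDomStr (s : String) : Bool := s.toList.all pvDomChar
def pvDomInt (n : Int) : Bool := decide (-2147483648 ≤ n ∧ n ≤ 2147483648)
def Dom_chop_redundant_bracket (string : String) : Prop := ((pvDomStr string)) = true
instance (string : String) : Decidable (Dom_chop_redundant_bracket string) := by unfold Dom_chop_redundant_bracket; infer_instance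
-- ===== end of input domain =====

-- B replaces A's repeated whole-string rescans and per-step slicing by one balance pass,
-- one trimming pass and a closed-form outer-pair count (objective: faster).

-- ===== PORT A =====
def hasRightLevel (s : List Char) : Bool × Option Int :=
  let level := s.foldl (fun l ch => if ch = '(' then l + 1 else if ch = ')' then l - 1 else l) (0 : Int)
  if level = 0 then (true, none)
  else if level > 0 then (false, some 0)
  else (false, some 1)

theorem hrl_false_ne_nil (s : List Char) (h : (hasRightLevel s).1 = false) : s ≠ [] := by
  rintro rfl
  simp [hasRightLevel] at h

-- first while loop; string[1:] = drop 1 and string[:-1] = dropLast (exact: the loop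
-- only recurses on a nonempty string, see hrl_false_ne_nil)
def loop1 (s : List Char) : List Char :=
  if _h : (hasRightLevel s).1 = true then s
  else if (hasRightLevel s).2 = some 0 then loop1 (s.drop 1)
  else loop1 (s.dropLast)
termination_by s.length
decreasing_by
  · have := hrl_false_ne_nil s (by simpa using _h)
    have : 0 < s.length := List.length_pos_iff.mpr this
    simp; omega
  · have := hrl_false_ne_nil s (by simpa using _h)
    have : 0 < s.length := List.length_pos_iff.mpr this
    simp [List.length_dropLast]; omega

-- second while loop; string[1:-1] = dropLast (drop 1 s) (exact for len > 2)
def loop2 (s : List Char) : List Char :=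
  if 2 < s.length ∧ s.head? = some '(' ∧ s.getLast? = some ')' then loop2 ((s.drop 1).dropLast)
  else s
termination_by s.length
decreasing_by simp [List.length_dropLast]; omega

def chop_redundant_bracket (string : String) : String :=
  String.mk (loop2 (loop1 string.toList))

-- ===== PORT B =====
def pvDelta (ch : Char) : Int := (if ch = '(' then (1 : Int) else 0) - (if ch = ')' then 1 else 0)

-- drop the shortest prefix whose bracket-sum equals bal; return the rest
def dropBalance : Int → List Char → List Char
  | _, [] => []
  | bal, c :: rest =>
      let b := bal - pvDelta c
      if b = 0 then rest else dropBalance b rest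

-- the leading run of c (B's counting while loop, as structural recursion over the same chars)
def leadRun (c : Char) : List Char → Nat
  | [] => 0
  | x :: r => if x = c then leadRun c r + 1 else 0

def chop_redundant_bracket_alt (string : String) : String :=
  let s0 := string.toList
  let bal := (s0.count '(' : Int) - (s0.count ')' : Int)
  let s1 := if bal > 0 then dropBalance bal s0
            else if bal < 0 then (dropBalance bal s0.reverse).reverse
            else s0
  let n := s1.length
  let p := leadRun '(' s1
  let q := leadRun ')' s1.reverse
  -- k = min(p, q, max(0, (n-1)//2)); Nat subtraction/division make the max(0,·) exact
  let k := min p (min q ((n - 1) / 2))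
  -- string[k:n-k] with 0 ≤ k ≤ n-k
  String.mk ((s1.drop k).take (n - 2 * k))

-- ===== PRECONDITION & SPEC =====
def Spec_chop_redundant_bracket (string : String) (out : String) : Prop := out = chop_redundant_bracket_alt string
instance (string : String) (out : String) : Decidable (Spec_chop_redundant_bracket string out) := by unfold Spec_chop_redundant_bracket; infer_instance

-- ===== CLAIM (what is proved, stated in full; the proofs are below) =====
def Claim_equal_chop_redundant_bracket : Prop := ∀ (string : String), Dom_chop_redundant_bracket string → Spec_chop_redundant_bracket string (chop_redundant_bracket string)

-- ===== LEMMAS AND PROOFS =====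

def balSum (s : List Char) : Int := (s.map pvDelta).sum

theorem stepA_eq (l : Int) (ch : Char) :
    (if ch = '(' then l + 1 else if ch = ')' then l - 1 else l) = l + pvDelta ch := by
  rcases eq_or_ne ch '(' with rfl | h1
  · simp [pvDelta, show ¬ (('(' : Char) = ')') by decide]
  · rcases eq_or_ne ch ')' with rfl | h2
    · simp [pvDelta, show ¬ ((')' : Char) = '(') by decide]
      try omega
    · simp [pvDelta, h1, h2]

theorem foldl_stepA (s : List Char) (a : Int) :
    s.foldl (fun l ch => if ch = '(' then l + 1 else if ch = ')' then l - 1 else l) a = a + balSum s := by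
  induction s generalizing a with
  | nil => simp [balSum]
  | cons c r ih =>
      rw [List.foldl_cons, stepA_eq, ih]
      simp [balSum]
      ring

theorem count_balSum (s : List Char) : (s.count '(' : Int) - (s.count ')' : Int) = balSum s := by
  induction s with
  | nil => simp [balSum]
  | cons c r ih =>
      simp only [List.count_cons, balSum, List.map_cons, List.sum_cons, pvDelta] at *
      rcases eq_or_ne c '(' with rfl | h1
      · simp [show ¬ (('(' : Char) = ')') by decide] at *
        omega
      · rcases eq_or_ne c ')' with rfl | h2
        · simp [show ¬ ((')' : Char) = '(') by decide] at *
          omega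
        · simp [h1, h2] at *
          omega

theorem hrl_eq (s : List Char) :
    hasRightLevel s =
      if balSum s = 0 then (true, none)
      else if balSum s > 0 then (false, some 0) else (false, some 1) := by
  simp [hasRightLevel, foldl_stepA]

theorem balSum_reverse (s : List Char) : balSum s.reverse = balSum s := by
  simp [balSum, List.sum_reverse]

theorem pvDelta_le_one (c : Char) : pvDelta c ≤ 1 := by
  simp [pvDelta]; split_ifs <;> omega

theorem neg_one_le_pvDelta (c : Char) : -1 ≤ pvDelta c := by
  simp [pvDelta]; split_ifs <;> omega

-- B's phase-1 result, as a function of the real balance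
def phase1B (s : List Char) : List Char :=
  if balSum s > 0 then dropBalance (balSum s) s
  else if balSum s < 0 then (dropBalance (balSum s) s.reverse).reverse
  else s

theorem phase1_eq (s : List Char) : loop1 s = phase1B s := by
  induction s using loop1.induct with
  | case1 s h =>
      have h0 : balSum s = 0 := by
        by_contra hne
        rw [hrl_eq] at h
        rcases lt_or_gt_of_ne hne with hlt | hgt
        · simp [hne, show ¬ balSum s > 0 by omega] at h
        · simp [hne, hgt] at h
      rw [loop1, dif_pos h]
      unfold phase1B
      rw [if_neg (by omega), if_neg (by omega)]
  | case2 s h h2 ih =>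
      rw [hrl_eq] at h h2
      have h0 : balSum s ≠ 0 := by intro he; simp [he] at h
      have hpos : 0 < balSum s := by
        by_contra hnp
        simp [h0, show ¬ balSum s > 0 by omega] at h2
      obtain ⟨c, rest, rfl⟩ : ∃ c rest, s = c :: rest := by
        cases s with
        | nil => simp [balSum] at hpos
        | cons c r => exact ⟨c, r, rfl⟩
      have hd : balSum (c :: rest) = pvDelta c + balSum rest := by simp [balSum]
      have hge : 0 ≤ balSum rest := by have := pvDelta_le_one c; omega
      rw [loop1, dif_neg (by rw [hrl_eq]; simp [h0, hpos]),
          if_pos (by rw [hrl_eq]; simp [h0, hpos])]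
      simp only [List.drop_one, List.tail_cons] at ih ⊢
      rw [ih]
      conv_rhs => rw [phase1B]
      rw [if_pos hpos]
      simp only [dropBalance]
      rcases eq_or_lt_of_le hge with he | hlt
      · rw [if_pos (by omega : balSum (c :: rest) - pvDelta c = 0)]
        unfold phase1B
        rw [if_neg (by omega), if_neg (by omega)]
      · rw [if_neg (by omega : ¬ balSum (c :: rest) - pvDelta c = 0)]
        unfold phase1B
        rw [if_pos hlt]
        congr 1
        omega
  | case3 s h h2 ih =>
      rw [hrl_eq] at h h2
      have h0 : balSum s ≠ 0 := by intro he; simp [he] at h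
      have hneg : balSum s < 0 := by
        by_contra hnn
        simp [h0, show balSum s > 0 by omega] at h2
      have hsne : s ≠ [] := by rintro rfl; simp [balSum] at hneg
      obtain ⟨c, rest, hrev⟩ : ∃ c rest, s.reverse = c :: rest := by
        cases hr : s.reverse with
        | nil => exact absurd (by simpa using congrArg List.reverse hr) hsne
        | cons c r => exact ⟨c, r, rfl⟩
      have hs : s = rest.reverse ++ [c] := by
        have := congrArg List.reverse hrev; simpa using this
      have hdl : s.dropLast = rest.reverse := by rw [hs]; simp
      have hbr : balSum rest = balSum s - pvDelta c := by
        have h1 : balSum s = balSum s.reverse := (balSum_reverse s).symm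
        rw [h1, hrev]; simp [balSum]; try ring
      have hle : balSum rest ≤ 0 := by have := neg_one_le_pvDelta c; omega
      rw [loop1, dif_neg (by rw [hrl_eq]; simp [h0, show ¬ balSum s > 0 by omega]),
          if_neg (by rw [hrl_eq]; simp [h0, show ¬ balSum s > 0 by omega])]
      rw [ih, hdl]
      conv_rhs => rw [phase1B]
      rw [if_neg (by omega), if_pos hneg, hrev]
      simp only [dropBalance]
      rcases eq_or_lt_of_le hle with he | hlt
      · rw [if_pos (by omega : balSum s - pvDelta c = 0)]
        unfold phase1B
        rw [if_neg (by rw [balSum_reverse]; omega), if_neg (by rw [balSum_reverse]; omega)]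
      · rw [if_neg (by omega : ¬ balSum s - pvDelta c = 0)]
        unfold phase1B
        rw [if_neg (by rw [balSum_reverse]; omega), if_pos (by rw [balSum_reverse]; omega)]
        rw [balSum_reverse, List.reverse_reverse, hbr]

-- B's phase-2 result, as a function of the chopped string
def phase2B (s : List Char) : List Char :=
  (s.drop (min (leadRun '(' s) (min (leadRun ')' s.reverse) ((s.length - 1) / 2)))).take
    (s.length - 2 * min (leadRun '(' s) (min (leadRun ')' s.reverse) ((s.length - 1) / 2)))

theorem leadRun_append_ne (c d : Char) (l : List Char) (h : d ≠ c) :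
    leadRun c (l ++ [d]) = leadRun c l := by
  induction l with
  | nil => simp [leadRun, h]
  | cons x r ih => simp [leadRun, ih]

theorem phase2_eq (s : List Char) : loop2 s = phase2B s := by
  induction s using loop2.induct with
  | case1 s h ih =>
      obtain ⟨hlen, hhd, hlast⟩ := h
      obtain ⟨c, t, rfl⟩ : ∃ c t, s = c :: t := by
        cases s with
        | nil => simp at hhd
        | cons c r => exact ⟨c, r, rfl⟩
      have hc : c = '(' := by simpa using hhd
      subst hc
      have htne : t ≠ [] := by rintro rfl; simp at hlen
      obtain ⟨inner, c2, hti⟩ := t.eq_nil_or_concat.resolve_left htne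
      rw [List.concat_eq_append] at hti
      subst hti
      have hc2 : c2 = ')' := by
        rw [show ('(' :: (inner ++ [c2])) = ('(' :: inner) ++ [c2] from rfl,
            List.getLast?_concat] at hlast
        exact Option.some.inj hlast
      subst hc2
      rw [loop2, if_pos ⟨hlen, hhd, hlast⟩]
      have hinner : (('(' :: (inner ++ [')'])).drop 1).dropLast = inner := by simp
      rw [hinner] at ih
      rw [hinner, ih]
      have hn : ('(' :: (inner ++ [')'])).length = inner.length + 2 := by simp
      have hp : leadRun '(' ('(' :: (inner ++ [')'])) = leadRun '(' inner + 1 := by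
        simp [leadRun, leadRun_append_ne '(' ')' inner (by decide)]
      have hrev : ('(' :: (inner ++ [')'])).reverse = ')' :: (inner.reverse ++ ['(']) := by
        simp
      have hq : leadRun ')' ('(' :: (inner ++ [')'])).reverse = leadRun ')' inner.reverse + 1 := by
        rw [hrev]; simp [leadRun, leadRun_append_ne ')' '(' inner.reverse (by decide)]
      unfold phase2B
      simp only [hn, hp, hq]
      set p' := leadRun '(' inner
      set q' := leadRun ')' inner.reverse
      rcases Nat.eq_zero_or_pos inner.length with h0 | h0
      · exact absurd hlen (by simp [List.length_eq_zero_iff.mp h0])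
      have hdiv : (inner.length + 2 - 1) / 2 = (inner.length - 1) / 2 + 1 := by omega
      rw [hdiv]
      have hmin : min (p' + 1) (min (q' + 1) ((inner.length - 1) / 2 + 1)) =
          min p' (min q' ((inner.length - 1) / 2)) + 1 := by omega
      rw [hmin]
      set k' := min p' (min q' ((inner.length - 1) / 2)) with hk'
      have hk'le : k' ≤ inner.length := by
        have : (inner.length - 1) / 2 ≤ inner.length := by omega
        omega
      have hdrop : ('(' :: (inner ++ [')'])).drop (k' + 1) = (inner ++ [')']).drop k' := by simp
      rw [hdrop, List.drop_append_of_le_length hk'le]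
      have htake : inner.length + 2 - 2 * (k' + 1) = inner.length - 2 * k' := by omega
      rw [htake, List.take_append_of_le_length (by simp; omega)]
  | case2 s h =>
      rw [loop2, if_neg h]
      unfold phase2B
      suffices hk : min (leadRun '(' s) (min (leadRun ')' s.reverse) ((s.length - 1) / 2)) = 0 by
        rw [hk]; simp
      by_cases hl : 2 < s.length
      · by_cases hhd : s.head? = some '('
        · have hlast : s.getLast? ≠ some ')' := fun hg => h ⟨hl, hhd, hg⟩
          have hz : leadRun ')' s.reverse = 0 := by
            cases hr : s.reverse with
            | nil => rfl
            | cons c r =>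
                have hgl : s.getLast? = some c := by rw [← List.head?_reverse, hr]; rfl
                have hc : c ≠ ')' := by rintro rfl; exact hlast hgl
                simp [leadRun, hc]
          omega
        · have hz : leadRun '(' s = 0 := by
            cases s with
            | nil => rfl
            | cons c r =>
                have hc : c ≠ '(' := by intro hc; exact hhd (by simp [hc])
                simp [leadRun, hc]
          omega
      · have : (s.length - 1) / 2 = 0 := by omega
        omega

-- ===== VERDICT (by name: the statement is the Claim_ definition above) =====
theorem chop_redundant_bracket_spec : Claim_equal_chop_redundant_bracket := by
  intro s _
  unfold Spec_chop_redundant_bracket chop_redundant_bracket chop_redundant_bracket_alt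
  rw [phase1_eq, phase2_eq]
  simp only [count_balSum]
  rfl
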